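-- pv_equiv track=rewrite | github.com/kawish304/Mehwish-Chat-AI-2.0 | main.py | format_code_blocks
-- ===== SOURCE A (Python) =====
-- def format_code_blocks(text: str) -> str:
--     lines = text.split("\n")
--     in_code = False
--     out = []
--     for line in lines:
--         if "```" in line:
--             in_code = not in_code
--             out.append(line)
--         elif in_code:
--             out.append(f"    {line}")
--         else:
--             out.append(line)
--     return "\n".join(out)
-- ===== SOURCE B (Python) =====
-- def format_code_blocks(text: str) -> str:
--     lines = text.split("\n")
--     fences = ["```" in line for line in lines]
--     counts = []
--     c = 0
--     for f in fences:
--         counts.append(c)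
--         if f:
--             c += 1
--     out = [
--         line if f else ("    " + line if k % 2 == 1 else line)
--         for line, f, k in zip(lines, fences, counts)
--     ]
--     return "\n".join(out)
-- ===== Notes on version B (the rewrite author's own statement) =====
-- stated objective: alternative
-- what changed: Replaces the single toggling state-machine loop with an index-then-transform two-pass structure: first compute per-line fence flags and the prefix fence counts, then map each line independently using the parity of its prefix count.
import Mathlib
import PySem

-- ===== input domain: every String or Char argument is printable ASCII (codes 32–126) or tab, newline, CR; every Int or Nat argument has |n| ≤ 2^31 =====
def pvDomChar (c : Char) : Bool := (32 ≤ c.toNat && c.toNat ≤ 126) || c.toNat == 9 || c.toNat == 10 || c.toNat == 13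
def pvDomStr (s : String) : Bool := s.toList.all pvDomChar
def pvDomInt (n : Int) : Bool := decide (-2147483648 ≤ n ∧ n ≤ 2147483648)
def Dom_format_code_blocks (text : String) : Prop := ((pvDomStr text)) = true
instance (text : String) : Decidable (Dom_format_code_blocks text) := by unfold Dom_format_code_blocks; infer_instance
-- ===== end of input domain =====

-- B replaces A's toggling state-machine loop by a two-pass index-then-transform
-- structure (fence flags + prefix fence counts, then an independent per-line map);
-- same cost, alternative decomposition.

-- ===== PORT A =====
def format_code_blocks (text : String) : String :=
  let lines := (PySem.Str.split? text "\n").getD []   -- sep "\n" ≠ "", so split? is always some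
  let res := lines.foldl
    (fun (st : Bool × List String) line =>
      if PySem.Str.isIn "```" line then (!st.1, st.2 ++ [line])
      else if st.1 then (st.1, st.2 ++ ["    " ++ line])
      else (st.1, st.2 ++ [line]))
    (false, [])
  PySem.Str.join "\n" res.2

-- ===== PORT B =====
def format_code_blocks_alt (text : String) : String :=
  let lines := (PySem.Str.split? text "\n").getD []   -- sep "\n" ≠ "", so split? is always some
  let fences := lines.map (fun line => PySem.Str.isIn "```" line)
  let counts := (fences.foldl
    (fun (st : Nat × List Nat) f =>
      (if f then st.1 + 1 else st.1, st.2 ++ [st.1]))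
    (0, [])).2
  let out := (lines.zip (fences.zip counts)).map
    (fun p => if p.2.1 then p.1 else if p.2.2 % 2 == 1 then "    " ++ p.1 else p.1)
  PySem.Str.join "\n" out

-- ===== PRECONDITION & SPEC =====
def Spec_format_code_blocks (text : String) (out : String) : Prop := out = format_code_blocks_alt text
instance (text : String) (out : String) : Decidable (Spec_format_code_blocks text out) := by unfold Spec_format_code_blocks; infer_instance

-- ===== CLAIM (what is proved, stated in full; the proofs are below) =====
def Claim_equal_format_code_blocks : Prop := ∀ (text : String), Dom_format_code_blocks text → Spec_format_code_blocks text (format_code_blocks text)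

-- ===== LEMMAS AND PROOFS =====

-- the transformed lines, as a direct recursion carrying the prefix fence count
-- (abstract in the fence test so simp cannot unfold it)
def pvRun (fence : String → Bool) (lines : List String) (c : Nat) : List String :=
  match lines with
  | [] => []
  | l :: ls =>
    (if fence l then l else if c % 2 == 1 then "    " ++ l else l)
      :: pvRun fence ls (if fence l then c + 1 else c)

-- the prefix counts list, as a direct recursion
def pvCounts (fs : List Bool) (c : Nat) : List Nat :=
  match fs with
  | [] => []
  | f :: fs => c :: pvCounts fs (if f then c + 1 else c)

theorem pvCounts_fold (fs : List Bool) (c : Nat) (acc : List Nat) :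
    (fs.foldl (fun (st : Nat × List Nat) f =>
      (if f then st.1 + 1 else st.1, st.2 ++ [st.1])) (c, acc)).2
    = acc ++ pvCounts fs c := by
  induction fs generalizing c acc with
  | nil => simp [pvCounts]
  | cons f fs ih => simp [List.foldl, pvCounts, ih]

theorem pvB_run (fence : String → Bool) (lines : List String) (c : Nat) :
    (lines.zip ((lines.map fence).zip (pvCounts (lines.map fence) c))).map
      (fun p => if p.2.1 then p.1 else if p.2.2 % 2 == 1 then "    " ++ p.1 else p.1)
    = pvRun fence lines c := by
  induction lines generalizing c with
  | nil => simp [pvRun]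
  | cons l ls ih =>
    simp only [List.map_cons, pvCounts, List.zip_cons_cons, List.map_cons, pvRun]
    exact congrArg₂ List.cons rfl (ih _)

theorem parity_toggle (c : Nat) : (decide ((c + 1) % 2 = 1)) = !(decide (c % 2 = 1)) := by
  by_cases h : c % 2 = 1 <;> simp [h] <;> omega

theorem pvA_run (fence : String → Bool) (lines : List String) (c : Nat) (out : List String) :
    (lines.foldl
      (fun (st : Bool × List String) line =>
        if fence line then (!st.1, st.2 ++ [line])
        else if st.1 then (st.1, st.2 ++ ["    " ++ line])
        else (st.1, st.2 ++ [line]))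
      (decide (c % 2 = 1), out)).2
    = out ++ pvRun fence lines c := by
  induction lines generalizing c out with
  | nil => simp [pvRun]
  | cons l ls ih =>
    simp only [List.foldl, pvRun]
    by_cases h : fence l = true
    · rw [if_pos h, ← parity_toggle, ih (c + 1)]
      simp [h]
    · rw [if_neg h]
      by_cases hp : c % 2 = 1
      · rw [if_pos (by simp [hp] : (decide (c % 2 = 1)) = true), ih c]
        simp [h, hp]
      · rw [if_neg (by simp [hp] : ¬ (decide (c % 2 = 1)) = true), ih c]
        simp [h, hp]

-- ===== VERDICT (by name: the statement is the Claim_ definition above) =====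
theorem format_code_blocks_spec : Claim_equal_format_code_blocks := by
  intro text _
  unfold Spec_format_code_blocks format_code_blocks format_code_blocks_alt
  simp only
  rw [pvCounts_fold, List.nil_append,
    pvB_run (fun line => PySem.Str.isIn "```" line) _ 0]
  have h := pvA_run (fun line => PySem.Str.isIn "```" line)
    ((PySem.Str.split? text "\n").getD []) 0 []
  rw [show (decide ((0 : Nat) % 2 = 1)) = false by decide] at h
  rw [h, List.nil_append]
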